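-- pv_equiv track=rewrite | github.com/faceyacc/codecrafters-sqlite-python | app/filter.py | where_filter
-- ===== SOURCE A (Python) =====
-- def where_filter(table, index, where_clause):
--     """
--     Returns a filtered table given a table, index, and WHERE clause
--
--     Args:
--         table (list): The table to filter
--         index (int): The index of the table to filter
--         where_clause (str): The WHERE clause to filter by
--
--     Returns:
--         list: The filtered table
--     """
--     rows = []
--     for row in table:
--         rows.append(row[index])
--
--     # Removes duplicates while perserving order
--     seen = set()
--
--     if where_clause in rows:
--         rows.pop()
--
--     rows = [row for row in rows if not (row in seen or seen.add(row))]
--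
--     return '|'.join(rows)
-- ===== SOURCE B (Python) =====
-- def where_filter(table, index, where_clause):
--     rows = [row[index] for row in table]
--     if where_clause in rows:
--         rows = rows[:-1]
--
--     def distinct(xs):
--         # keep the head, delete ALL its later copies, recurse on what is left
--         if not xs:
--             return []
--         head = xs[0]
--         return [head] + distinct([x for x in xs[1:] if x != head])
--
--     return '|'.join(distinct(rows))
-- ===== Notes on version B (the rewrite author's own statement) =====
-- stated objective: alternative
-- what changed: Replaces the single forward pass with a mutated seen-set by a recursive divide step: keep the head, filter every later copy of it out of the tail, and recurse on the shrunken remainder - no membership structure is maintained at all; column extraction uses a comprehension and the pop() becomes a [:-1] slice.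
import Mathlib
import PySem

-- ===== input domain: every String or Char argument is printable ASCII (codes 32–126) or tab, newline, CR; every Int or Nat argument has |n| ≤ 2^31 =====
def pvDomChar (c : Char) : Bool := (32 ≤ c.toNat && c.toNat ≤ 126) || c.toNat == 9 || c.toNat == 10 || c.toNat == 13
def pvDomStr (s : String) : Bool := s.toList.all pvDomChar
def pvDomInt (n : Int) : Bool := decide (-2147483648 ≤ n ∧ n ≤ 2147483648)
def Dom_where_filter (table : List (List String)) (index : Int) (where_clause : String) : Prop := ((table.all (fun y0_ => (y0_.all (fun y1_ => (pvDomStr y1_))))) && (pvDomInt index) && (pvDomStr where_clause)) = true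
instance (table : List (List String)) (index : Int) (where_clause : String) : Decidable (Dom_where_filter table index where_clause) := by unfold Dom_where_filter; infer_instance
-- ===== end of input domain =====

-- B dedups by a recursive divide step (keep the head, filter all its later copies out of the
-- tail, recurse) instead of A's forward pass with a mutated seen-set; objective: alternative.


-- ===== PORT A =====
-- rows built by an append loop; pop() removes the LAST element; dedup via a 'seen' set
-- (the 'row in seen or seen.add(row)' trick) carried through the comprehension as a fold state.
def where_filter (table : List (List String)) (index : Int) (where_clause : String) : String :=
  let rows : List String := table.foldl (fun acc row => acc ++ [PySem.List.pyGetD row index ""]) []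
  let rows : List String := if where_clause ∈ rows then rows.dropLast else rows
  let deduped : List String :=
    (rows.foldl
      (fun (st : PySem.Set String × List String) row =>
        if PySem.Set.contains st.1 row then st else (PySem.Set.add st.1 row, st.2 ++ [row]))
      (PySem.Set.empty, [])).2
  PySem.Str.join "|" deduped

-- ===== PORT B =====
-- recursive dedup: keep xs[0], delete its later copies from xs[1:], recurse on the remainder.
def pvDistinct : List String → List String
  | [] => []
  | x :: t => x :: pvDistinct (t.filter (fun y => y != x))
termination_by xs => xs.length
decreasing_by
  simp only [List.length_unattach, List.length_cons]
  exact Nat.lt_succ_of_le (le_trans (List.length_filter_le _ _) (by simp))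

def where_filter_alt (table : List (List String)) (index : Int) (where_clause : String) : String :=
  let rows : List String := table.map (fun row => PySem.List.pyGetD row index "")
  let rows : List String := if where_clause ∈ rows then PySem.List.slice rows none (some (-1)) else rows
  PySem.Str.join "|" (pvDistinct rows)

-- ===== PRECONDITION & SPEC =====
-- Pre_ excludes exactly the inputs on which A raises IndexError: some row lacks position 'index'.
def Pre_where_filter (table : List (List String)) (index : Int) (where_clause : String) : Prop :=
  ∀ row ∈ table, PySem.Raise.InRange row.length index
instance (table : List (List String)) (index : Int) (where_clause : String) : Decidable (Pre_where_filter table index where_clause) := by unfold Pre_where_filter; infer_instance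
def pvWitness_where_filter : List (List String) × Int × String := ([["a"], ["b"], ["a"]], 0, "x")

def Spec_where_filter (table : List (List String)) (index : Int) (where_clause : String) (out : String) : Prop := out = where_filter_alt table index where_clause
instance (table : List (List String)) (index : Int) (where_clause : String) (out : String) : Decidable (Spec_where_filter table index where_clause out) := by unfold Spec_where_filter; infer_instance

-- ===== CLAIM =====
def Claim_equal_where_filter : Prop := ∀ (table : List (List String)) (index : Int) (where_clause : String), Dom_where_filter table index where_clause → Pre_where_filter table index where_clause → Spec_where_filter table index where_clause (where_filter table index where_clause)

-- ===== LEMMAS AND PROOFS =====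

theorem pvDistinct_nil : pvDistinct [] = [] := by simp [pvDistinct]
theorem pvDistinct_cons (x : String) (t : List String) :
    pvDistinct (x :: t) = x :: pvDistinct (t.filter (fun y => y != x)) := by rw [pvDistinct.eq_def]

-- A's fold keeps its set and its output list identical when they start identical.
theorem pv_pair_fold (l : List String) (s : List String) :
    l.foldl
      (fun (st : PySem.Set String × List String) row =>
        if PySem.Set.contains st.1 row then st else (PySem.Set.add st.1 row, st.2 ++ [row]))
      (s, s) = (l.foldl PySem.Set.add s, l.foldl PySem.Set.add s) := by
  induction l generalizing s with
  | nil => rfl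
  | cons x xs ih =>
      rw [List.foldl_cons, List.foldl_cons]
      have hstep : (if PySem.Set.contains s x = true then ((s : PySem.Set String), s)
          else (PySem.Set.add s x, s ++ [x])) = (PySem.Set.add s x, PySem.Set.add s x) := by
        by_cases hx : x ∈ s <;> simp [PySem.Set.add, hx]
      show List.foldl _ (if PySem.Set.contains s x = true then (s, s)
          else (PySem.Set.add s x, s ++ [x])) xs = _
      rw [hstep]
      exact ih _

-- the set-accumulating fold equals 'seen' followed by B's recursive dedup of the unseen part.
theorem pv_fold_add_distinct (l : List String) (seen : List String) :
    l.foldl PySem.Set.add seen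
      = seen ++ pvDistinct (l.filter (fun y => decide (y ∉ seen))) := by
  induction l generalizing seen with
  | nil => simp [pvDistinct_nil]
  | cons x t ih =>
      by_cases hx : x ∈ seen
      · have hadd : PySem.Set.add seen x = seen := by simp [PySem.Set.add, hx]
        rw [List.foldl_cons, hadd, ih seen]
        simp [hx]
      · have hadd : PySem.Set.add seen x = seen ++ [x] := by simp [PySem.Set.add, hx]
        rw [List.foldl_cons, hadd, ih (seen ++ [x])]
        have hfilter : t.filter (fun y => decide (y ∉ seen ++ [x]))
            = (t.filter (fun y => decide (y ∉ seen))).filter (fun y => y != x) := by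
          rw [List.filter_filter]
          apply List.filter_congr
          intro y _
          simp only [List.mem_append, List.mem_singleton, not_or, decide_not, Bool.and_comm]
          by_cases h : y = x <;> simp [h]
        rw [hfilter]
        simp [hx, pvDistinct_cons, List.append_assoc]

theorem pv_dedup_eq (rows : List String) :
    (rows.foldl
      (fun (st : PySem.Set String × List String) row =>
        if PySem.Set.contains st.1 row then st else (PySem.Set.add st.1 row, st.2 ++ [row]))
      (PySem.Set.empty, [])).2
    = pvDistinct rows := by
  have h1 := pv_pair_fold rows []
  have h2 := pv_fold_add_distinct rows []
  simp only [PySem.Set.empty] at h1 ⊢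
  rw [h1]
  simpa using h2

theorem pv_rows_eq (table : List (List String)) (index : Int) :
    table.foldl (fun acc row => acc ++ [PySem.List.pyGetD row index ""]) []
      = table.map (fun row => PySem.List.pyGetD row index "") := by
  simpa using PySem.List.foldl_append_singleton_eq_map (fun row => PySem.List.pyGetD row index "") table []

-- ===== VERDICT =====
theorem where_filter_spec : Claim_equal_where_filter := by
  intro table index wc _ _
  unfold Spec_where_filter where_filter where_filter_alt
  simp only [pv_rows_eq, PySem.List.slice_to_neg_one, pv_dedup_eq]
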